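-- pv_equiv track=rewrite | github.com/Aasthaengg/IBMdataset | Python_codes/p03157/s158562873.py | bfs_grid
-- ===== SOURCE A (Python) =====
-- from collections import deque
--
-- def bfs_grid(H, W, grid):
--
--     d = [[False for _ in range(W)] for _ in range(H)]
--     move = [(-1, 0), (1, 0), (0, -1), (0, 1)]
--     ans = 0
--
--     for sy in range(H):
--         for sx in range(W):
--             if d[sy][sx]:
--                 continue
--
--             q = deque()
--             q.append((sx, sy))
--             d[sy][sx] = True
--             black = 0
--             white = 0
--             while q:
--                 x, y = q.popleft()
--                 now_color = grid[y][x]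
--                 if now_color:
--                     white += 1
--                 else:
--                     black += 1
--                 for m in move:
--                     nx, ny = x + m[0], y + m[1]
--                     if 0 <= nx < W and 0 <= ny < H:
--                         if not d[ny][nx] and grid[ny][nx] != now_color:
--                             d[ny][nx] = True
--                             q.append((nx, ny))
--
--             ans += black * white
--
--     return ans
-- ===== SOURCE B (Python) =====
-- def bfs_grid(H, W, grid):
--     visited = set()
--     ans = 0
--     for sy in range(H):
--         for sx in range(W):
--             if (sx, sy) in visited:
--                 continue
--             comp = {(sx, sy)}
--             for _ in range(H * W + 1):
--                 new = set()
--                 for (x, y) in comp: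
--                     c = grid[y][x]
--                     for (nx, ny) in ((x - 1, y), (x + 1, y), (x, y - 1), (x, y + 1)):
--                         if 0 <= nx < W and 0 <= ny < H and (nx, ny) not in comp and grid[ny][nx] != c:
--                             new.add((nx, ny))
--                 if not new:
--                     break
--                 comp |= new
--             black = 0
--             white = 0
--             for (x, y) in comp:
--                 if grid[y][x]:
--                     white += 1
--                 else:
--                     black += 1
--             ans += black * white
--             visited |= comp
--     return ans
-- ===== Notes on version B (the rewrite author's own statement) =====
-- stated objective: alternative
-- what changed: Replaces the deque-BFS that marks a visited matrix and counts colours cell-by-cell with a set-based fixpoint saturation: each component is grown by repeatedly adding every differing-colour neighbour of the whole current set until it stabilises, and black/white are counted over the finished set; Pre_ excludes exactly the inputs where A raises IndexError (fewer than H rows, or a row among the first H shorter than W, with H, W > 0).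
import Mathlib
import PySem

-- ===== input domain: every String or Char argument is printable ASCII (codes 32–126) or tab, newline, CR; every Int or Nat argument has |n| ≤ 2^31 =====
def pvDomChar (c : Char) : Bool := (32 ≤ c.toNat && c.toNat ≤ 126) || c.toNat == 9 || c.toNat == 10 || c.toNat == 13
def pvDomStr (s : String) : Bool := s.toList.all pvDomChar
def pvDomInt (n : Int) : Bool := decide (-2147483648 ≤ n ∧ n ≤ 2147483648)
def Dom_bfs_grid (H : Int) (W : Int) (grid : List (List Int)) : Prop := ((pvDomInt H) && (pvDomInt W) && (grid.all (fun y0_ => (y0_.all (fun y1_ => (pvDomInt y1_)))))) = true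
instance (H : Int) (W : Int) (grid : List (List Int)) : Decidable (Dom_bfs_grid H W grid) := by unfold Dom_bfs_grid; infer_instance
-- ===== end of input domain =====

-- B replaces A's deque-BFS by a per-component set-saturation to a fixpoint (alternative algorithm, same values).

-- ===== PORT A =====
-- x[i][j] reads/writes: pyGetD/pySetD are exact for the in-range accesses the Python performs inside Pre_.
def getI (grid : List (List Int)) (y x : Int) : Int :=
  PySem.List.pyGetD (PySem.List.pyGetD grid y []) x 0

def getB (d : List (List Bool)) (y x : Int) : Bool :=
  PySem.List.pyGetD (PySem.List.pyGetD d y []) x false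

def set2d (d : List (List Bool)) (y x : Int) (v : Bool) : List (List Bool) :=
  PySem.List.pySetD d y (PySem.List.pySetD (PySem.List.pyGetD d y []) x v)

def moveList : List (Int × Int) := [(-1, 0), (1, 0), (0, -1), (0, 1)]

-- the 'for m in move:' body over a list of moves, acting on the (d, q) state
def stepMoves (W H : Int) (grid : List (List Int)) (nc : Int) (x y : Int)
    (st : List (List Bool) × List (Int × Int)) (ms : List (Int × Int)) :
    List (List Bool) × List (Int × Int) :=
  ms.foldl (fun st m =>
    let nx := x + m.1
    let ny := y + m.2
    if 0 ≤ nx ∧ nx < W ∧ 0 ≤ ny ∧ ny < H then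
      if getB st.1 ny nx = false ∧ getI grid ny nx ≠ nc then
        (set2d st.1 ny nx true, st.2 ++ [(nx, ny)])
      else st
    else st) st

-- the 'while q:' loop, fuelled (the fuel passed below is proved sufficient in the lemmas)
def bfsLoop (W H : Int) (grid : List (List Int)) :
    Nat → List (Int × Int) → List (List Bool) → Int → Int → Int × Int × List (List Bool)
  | _, [], d, black, white => (black, white, d)
  | 0, _ :: _, d, black, white => (black, white, d)
  | fuel + 1, (x, y) :: rest, d, black, white =>
      let nc := getI grid y x
      let black' := if nc ≠ 0 then black else black + 1
      let white' := if nc ≠ 0 then white + 1 else white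
      let st := stepMoves W H grid nc x y (d, rest) moveList
      bfsLoop W H grid fuel st.2 st.1 black' white'

def bfs_grid (H : Int) (W : Int) (grid : List (List Int)) : Int :=
  let d0 := (PySem.List.pyRange 0 H 1).map (fun _ => (PySem.List.pyRange 0 W 1).map (fun _ => false))
  ((PySem.List.pyRange 0 H 1).foldl (fun (st : List (List Bool) × Int) sy =>
    (PySem.List.pyRange 0 W 1).foldl (fun st sx =>
      if getB st.1 sy sx then st
      else
        let d1 := set2d st.1 sy sx true
        let r := bfsLoop W H grid (H.toNat * W.toNat + 1) [(sx, sy)] d1 0 0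
        (r.2.2, st.2 + r.1 * r.2.1)) st) (d0, 0)).2

-- ===== PORT B =====
def nbrTuples (x y : Int) : List (Int × Int) := [(x - 1, y), (x + 1, y), (x, y - 1), (x, y + 1)]

-- one saturation pass: every admissible differing-colour neighbour of the current set
def newFrom (W H : Int) (grid : List (List Int)) (comp : PySem.Set (Int × Int)) :
    PySem.Set (Int × Int) :=
  comp.foldl (fun acc p =>
    let c := getI grid p.2 p.1
    (nbrTuples p.1 p.2).foldl (fun acc q =>
      if 0 ≤ q.1 ∧ q.1 < W ∧ 0 ≤ q.2 ∧ q.2 < H ∧ ¬ q ∈ comp ∧ getI grid q.2 q.1 ≠ c then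
        PySem.Set.add acc q
      else acc) acc) PySem.Set.empty

-- the bounded 'for _ in range(H*W+1): ... if not new: break' loop
def satLoop (W H : Int) (grid : List (List Int)) :
    Nat → PySem.Set (Int × Int) → PySem.Set (Int × Int)
  | 0, comp => comp
  | n + 1, comp =>
      let new := newFrom W H grid comp
      if new = [] then comp else satLoop W H grid n (PySem.Set.union comp new)

def countBW (grid : List (List Int)) (comp : PySem.Set (Int × Int)) : Int × Int :=
  comp.foldl (fun bw p => if getI grid p.2 p.1 ≠ 0 then (bw.1, bw.2 + 1) else (bw.1 + 1, bw.2)) (0, 0)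

def bfs_grid_alt (H : Int) (W : Int) (grid : List (List Int)) : Int :=
  ((PySem.List.pyRange 0 H 1).foldl (fun (st : PySem.Set (Int × Int) × Int) sy =>
    (PySem.List.pyRange 0 W 1).foldl (fun st sx =>
      if (sx, sy) ∈ st.1 then st
      else
        let comp := satLoop W H grid (H * W + 1).toNat (PySem.Set.ofList [(sx, sy)])
        let bw := countBW grid comp
        (PySem.Set.union st.1 comp, st.2 + bw.1 * bw.2)) st) (PySem.Set.empty, 0)).2

-- ===== PRECONDITION & SPEC =====
-- Pre_ excludes exactly the inputs on which A raises IndexError: H, W > 0 with H exceeding the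
-- number of rows, or one of the first H rows shorter than W.
def Pre_bfs_grid (H : Int) (W : Int) (grid : List (List Int)) : Prop :=
  H ≤ 0 ∨ W ≤ 0 ∨ (H ≤ (grid.length : Int) ∧ ∀ row ∈ grid.take H.toNat, W ≤ (row.length : Int))
instance (H : Int) (W : Int) (grid : List (List Int)) : Decidable (Pre_bfs_grid H W grid) := by
  unfold Pre_bfs_grid; infer_instance

def pvWitness_bfs_grid : Int × Int × List (List Int) := (2, 2, [[0, 1], [1, 0]])

def Spec_bfs_grid (H : Int) (W : Int) (grid : List (List Int)) (out : Int) : Prop := out = bfs_grid_alt H W grid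
instance (H : Int) (W : Int) (grid : List (List Int)) (out : Int) : Decidable (Spec_bfs_grid H W grid out) := by unfold Spec_bfs_grid; infer_instance

-- ===== CLAIM (what is proved, stated in full; the proofs are below) =====
def Claim_equal_bfs_grid : Prop := ∀ (H : Int) (W : Int) (grid : List (List Int)), Dom_bfs_grid H W grid → Pre_bfs_grid H W grid → Spec_bfs_grid H W grid (bfs_grid H W grid)

-- ===== LEMMAS AND PROOFS =====

-- in-bounds cells, the neighbour relation, and the differing-colour adjacency
def inb (W H : Int) (c : Int × Int) : Prop := 0 ≤ c.1 ∧ c.1 < W ∧ 0 ≤ c.2 ∧ c.2 < H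

def nbrRel (a b : Int × Int) : Prop :=
  (b.2 = a.2 ∧ (b.1 = a.1 - 1 ∨ b.1 = a.1 + 1)) ∨ (b.1 = a.1 ∧ (b.2 = a.2 - 1 ∨ b.2 = a.2 + 1))

def adjP (W H : Int) (grid : List (List Int)) (a b : Int × Int) : Prop :=
  inb W H a ∧ inb W H b ∧ nbrRel a b ∧ getI grid b.2 b.1 ≠ getI grid a.2 a.1

lemma mem_nbrTuples (x y : Int) (b : Int × Int) : b ∈ nbrTuples x y ↔ nbrRel (x, y) b := by
  simp [nbrTuples, nbrRel, Prod.ext_iff]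
  omega

lemma adjP_symm (W H : Int) (grid : List (List Int)) {a b : Int × Int}
    (h : adjP W H grid a b) : adjP W H grid b a := by
  obtain ⟨h1, h2, h3, h4⟩ := h
  refine ⟨h2, h1, ?_, h4.symm⟩
  unfold nbrRel at h3 ⊢
  omega

-- reachability avoiding a set A
def rstep (W H : Int) (grid : List (List Int)) (A : Set (Int × Int)) (a b : Int × Int) : Prop :=
  adjP W H grid a b ∧ b ∉ A

def ReachS (W H : Int) (grid : List (List Int)) (A S : Set (Int × Int)) : Set (Int × Int) :=
  {x | ∃ s ∈ S, Relation.ReflTransGen (rstep W H grid A) s x}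

lemma reach_sources (W H : Int) (grid : List (List Int)) (A S : Set (Int × Int)) :
    S ⊆ ReachS W H grid A S := fun s hs => ⟨s, hs, Relation.ReflTransGen.refl⟩

lemma reach_closed (W H : Int) (grid : List (List Int)) (A S : Set (Int × Int)) {a b : Int × Int}
    (ha : a ∈ ReachS W H grid A S) (hab : adjP W H grid a b) (hb : b ∉ A) :
    b ∈ ReachS W H grid A S := by
  obtain ⟨s, hs, hr⟩ := ha
  exact ⟨s, hs, hr.tail ⟨hab, hb⟩⟩

lemma reach_least (W H : Int) (grid : List (List Int)) (A S X : Set (Int × Int))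
    (hS : S ⊆ X) (hX : ∀ a ∈ X, ∀ b, adjP W H grid a b → b ∉ A → b ∈ X) :
    ReachS W H grid A S ⊆ X := by
  rintro x ⟨s, hs, hr⟩
  induction hr with
  | refl => exact hS hs
  | tail _ hstep ih => exact hX _ ih _ hstep.1 hstep.2

lemma reach_cases (W H : Int) (grid : List (List Int)) (A S : Set (Int × Int)) {x : Int × Int}
    (hx : x ∈ ReachS W H grid A S) : x ∈ S ∨ x ∉ A := by
  obtain ⟨s, hs, hr⟩ := hx
  induction hr with
  | refl => exact Or.inl hs
  | tail _ hstep _ => exact Or.inr hstep.2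

lemma reach_subset_inb (W H : Int) (grid : List (List Int)) (A S : Set (Int × Int))
    (hS : ∀ s ∈ S, inb W H s) : ∀ x ∈ ReachS W H grid A S, inb W H x := by
  intro x hx
  refine reach_least W H grid A S {c | inb W H c} hS (fun a _ b hab _ => hab.2.1) hx

-- matrix layer: shape, reads, writes, the set of marked cells, and the false-count measure
def Shaped (H W : Int) (d : List (List Bool)) : Prop :=
  d.length = H.toNat ∧ ∀ r ∈ d, r.length = W.toNat

def dSet (W H : Int) (d : List (List Bool)) : Set (Int × Int) :=
  {c | inb W H c ∧ getB d c.2 c.1 = true}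

def countFalse (d : List (List Bool)) : Nat :=
  (d.map (fun r => (r.map (fun b => if b then 0 else 1)).sum)).sum

lemma pyGetD_mem_or {α : Type} (xs : List α) (i : Int) (dv : α) :
    PySem.List.pyGetD xs i dv ∈ xs ∨ PySem.List.pyGetD xs i dv = dv := by
  by_cases h : PySem.Raise.InRange xs.length i
  · exact Or.inl (PySem.List.pyGetD_mem xs dv h)
  · right
    apply PySem.List.pyGetD_of_none
    rw [PySem.List.pyGet?_eq_none_iff]
    exact h

lemma yb (H W : Int) (d : List (List Bool)) (hd : Shaped H W d) (x y : Int)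
    (hin : inb W H (x, y)) : y.toNat < d.length := by
  obtain ⟨h1, h2, h3, h4⟩ := hin
  have := hd.1
  simp only at h3 h4
  omega

lemma xb (H W : Int) (d : List (List Bool)) (hd : Shaped H W d) (x y : Int)
    (hin : inb W H (x, y)) :
    x.toNat < (d[y.toNat]'(yb H W d hd x y hin)).length := by
  rw [hd.2 _ (List.getElem_mem (yb H W d hd x y hin))]
  obtain ⟨h1, h2, h3, h4⟩ := hin
  simp only at h1 h2
  omega

lemma getB_eq (H W : Int) (d : List (List Bool)) (hd : Shaped H W d) (x y : Int)
    (hin : inb W H (x, y)) :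
    getB d y x = (d[y.toNat]?.getD [])[x.toNat]?.getD false := by
  have hy := yb H W d hd x y hin
  have hx := xb H W d hd x y hin
  obtain ⟨h1, h2, h3, h4⟩ := hin
  simp only at h1 h2 h3 h4
  unfold getB
  rw [PySem.List.pyGetD_eq_getElem d [] h3 (by have := hd.1; omega)]
  rw [PySem.List.pyGetD_eq_getElem _ false h1 (by rw [hd.2 _ (List.getElem_mem _)]; omega)]
  rw [List.getElem?_eq_getElem hy]
  simp only [Option.getD_some]
  rw [List.getElem?_eq_getElem hx]
  simp only [Option.getD_some]

lemma set2d_eq (H W : Int) (d : List (List Bool)) (hd : Shaped H W d) (x y : Int) (v : Bool)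
    (hin : inb W H (x, y)) :
    set2d d y x v = d.set y.toNat ((d[y.toNat]'(yb H W d hd x y hin)).set x.toNat v) := by
  obtain ⟨h1, h2, h3, h4⟩ := hin
  simp only at h1 h2 h3 h4
  unfold set2d
  rw [PySem.List.pyGetD_eq_getElem d [] h3 (by have := hd.1; omega)]
  rw [PySem.List.pySetD_of_nonneg _ _ h1, PySem.List.pySetD_of_nonneg _ _ h3]

lemma shaped_set2d (H W : Int) (d : List (List Bool)) (hd : Shaped H W d) (x y : Int) (v : Bool)
    (hin : inb W H (x, y)) :
    Shaped H W (set2d d y x v) := by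
  rw [set2d_eq H W d hd x y v hin]
  constructor
  · rw [List.length_set]; exact hd.1
  · intro r hr
    rcases List.mem_or_eq_of_mem_set hr with h | h
    · exact hd.2 _ h
    · subst h
      rw [List.length_set]
      exact hd.2 _ (List.getElem_mem _)

lemma getB_set2d (H W : Int) (d : List (List Bool)) (hd : Shaped H W d) (x y : Int) (v : Bool)
    (hxy : inb W H (x, y)) (x' y' : Int) (hq : inb W H (x', y')) :
    getB (set2d d y x v) y' x' = if y' = y ∧ x' = x then v else getB d y' x' := by
  have hs := shaped_set2d H W d hd x y v hxy
  have hy := yb H W d hd x y hxy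
  have hx := xb H W d hd x y hxy
  rw [getB_eq H W _ hs x' y' hq, set2d_eq H W d hd x y v hxy, getB_eq H W d hd x' y' hq]
  obtain ⟨a1, a2, a3, a4⟩ := hxy
  obtain ⟨b1, b2, b3, b4⟩ := hq
  simp only at a1 a2 a3 a4 b1 b2 b3 b4
  by_cases hyy : y' = y
  · subst hyy
    rw [List.getElem?_set_self (by exact hy)]
    simp only [Option.getD_some]
    rw [List.getElem?_set]
    by_cases hxx : x' = x
    · subst hxx
      have : x'.toNat = x'.toNat := rfl
      simp [hx]
    · have hne : ¬ x.toNat = x'.toNat := by omega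
      rw [List.getElem?_eq_getElem hy]
      simp [hne, hxx]
  · have hne : y.toNat ≠ y'.toNat := by omega
    rw [List.getElem?_set_ne hne]
    simp [hyy]

lemma sum_set_nat (l : List Nat) (n : Nat) (a : Nat) (h : n < l.length) :
    (l.set n a).sum + l[n] = l.sum + a := by
  induction l generalizing n with
  | nil => simp at h
  | cons x xs ih =>
    cases n with
    | zero => simp [List.set]; omega
    | succ m =>
      simp only [List.set, List.sum_cons, List.getElem_cons_succ]
      have := ih m (by simpa using h)
      omega

lemma countFalse_set2d (H W : Int) (d : List (List Bool)) (hd : Shaped H W d) (x y : Int)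
    (hxy : inb W H (x, y)) (hb : getB d y x = false) :
    countFalse (set2d d y x true) + 1 = countFalse d := by
  have hy := yb H W d hd x y hxy
  have hx := xb H W d hd x y hxy
  have hb' : d[y.toNat][x.toNat] = false := by
    rw [getB_eq H W d hd x y hxy] at hb
    rw [List.getElem?_eq_getElem hy] at hb
    simp only [Option.getD_some] at hb
    rw [List.getElem?_eq_getElem hx] at hb
    simpa using hb
  rw [set2d_eq H W d hd x y true hxy]
  unfold countFalse
  rw [List.map_set]
  have hylen : y.toNat < (d.map (fun r => (r.map (fun b => if b then 0 else 1)).sum)).length := by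
    simpa using hy
  have h1 := sum_set_nat (d.map (fun r => (r.map (fun b => if b then 0 else 1)).sum)) y.toNat
    ((d[y.toNat].set x.toNat true).map (fun b => if b then 0 else 1)).sum hylen
  have hget : (d.map (fun r => (r.map (fun b => if b then 0 else 1)).sum))[y.toNat]'hylen
      = (d[y.toNat].map (fun b => if b then 0 else 1)).sum := by
    simp
  rw [hget] at h1
  have hxlen : x.toNat < (d[y.toNat].map (fun b => (if b then 0 else 1 : Nat))).length := by
    simpa using hx
  have h2 := sum_set_nat (d[y.toNat].map (fun b => if b then 0 else 1)) x.toNat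
    (if true then 0 else 1) hxlen
  rw [← List.map_set] at h2
  have hget2 : (d[y.toNat].map (fun b => (if b then 0 else 1 : Nat)))[x.toNat]'hxlen
      = (if d[y.toNat][x.toNat] then 0 else 1) := by
    simp
  rw [hget2, hb'] at h2
  simp only [if_true, Bool.false_eq_true, if_false] at h2
  omega

lemma sum_ind_le (r : List Bool) : (r.map (fun b => if b then 0 else 1)).sum ≤ r.length := by
  induction r with
  | nil => simp
  | cons b t ih =>
    simp only [List.map_cons, List.sum_cons, List.length_cons]
    split <;> omega

lemma sum_le_mul (l : List Nat) (B : Nat) (h : ∀ x ∈ l, x ≤ B) : l.sum ≤ l.length * B := by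
  induction l with
  | nil => simp
  | cons a t ih =>
    simp only [List.sum_cons, List.length_cons, Nat.succ_mul]
    have := ih (fun x hx => h x (List.mem_cons_of_mem _ hx))
    have := h a (List.mem_cons_self)
    omega

lemma countFalse_le (H W : Int) (d : List (List Bool)) (hd : Shaped H W d) :
    countFalse d ≤ H.toNat * W.toNat := by
  unfold countFalse
  have h1 : (d.map (fun r => (r.map (fun b => if b then 0 else 1)).sum)).sum
      ≤ (d.map (fun r => (r.map (fun b => if b then 0 else 1)).sum)).length * W.toNat := by
    apply sum_le_mul
    intro v hv
    simp only [List.mem_map] at hv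
    obtain ⟨r, hr, rfl⟩ := hv
    calc (r.map (fun b => if b then 0 else 1)).sum ≤ r.length := sum_ind_le r
      _ = W.toNat := hd.2 _ hr
  simpa [hd.1] using h1

lemma shaped_d0 (H W : Int) :
    Shaped H W ((PySem.List.pyRange 0 H 1).map (fun _ => (PySem.List.pyRange 0 W 1).map (fun _ => false))) := by
  constructor
  · simp [PySem.List.length_pyRange_one]
  · intro r hr
    simp only [List.mem_map] at hr
    obtain ⟨_, _, rfl⟩ := hr
    simp [PySem.List.length_pyRange_one]

lemma getB_d0 (H W : Int) (x y : Int) :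
    getB ((PySem.List.pyRange 0 H 1).map (fun _ => (PySem.List.pyRange 0 W 1).map (fun _ => false))) y x = false := by
  unfold getB
  rcases pyGetD_mem_or ((PySem.List.pyRange 0 H 1).map (fun _ => (PySem.List.pyRange 0 W 1).map (fun _ => false))) y [] with h | h
  · simp only [List.mem_map] at h
    obtain ⟨_, _, hrow⟩ := h
    rw [← hrow]
    rcases pyGetD_mem_or ((PySem.List.pyRange 0 W 1).map fun _ => false) x false with h2 | h2
    · simp only [List.mem_map] at h2
      obtain ⟨_, _, hv⟩ := h2
      exact hv.symm
    · exact h2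
  · rw [h]
    rcases pyGetD_mem_or ([] : List Bool) x false with h2 | h2
    · simp at h2
    · exact h2

-- counting layer: finite cell rectangle and black/white counts of a set of cells
noncomputable def cellsF (W H : Int) : Finset (Int × Int) := Finset.Ico 0 W ×ˢ Finset.Ico 0 H

lemma mem_cellsF (W H : Int) (c : Int × Int) : c ∈ cellsF W H ↔ inb W H c := by
  cases c with
  | mk a b => simp [cellsF, inb, Finset.mem_product, and_assoc]

noncomputable def toF (W H : Int) (X : Set (Int × Int)) : Finset (Int × Int) :=
  @Finset.filter _ (fun c => c ∈ X) (Classical.decPred _) (cellsF W H)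

lemma mem_toF (W H : Int) (X : Set (Int × Int)) (c : Int × Int) :
    c ∈ toF W H X ↔ inb W H c ∧ c ∈ X := by
  unfold toF
  rw [@Finset.mem_filter _ _ (Classical.decPred _), mem_cellsF]

noncomputable def bcount (W H : Int) (grid : List (List Int)) (X : Set (Int × Int)) : Nat :=
  ((toF W H X).filter (fun c => getI grid c.2 c.1 = 0)).card

noncomputable def wcount (W H : Int) (grid : List (List Int)) (X : Set (Int × Int)) : Nat :=
  ((toF W H X).filter (fun c => getI grid c.2 c.1 ≠ 0)).card

lemma toF_empty (W H : Int) : toF W H ∅ = ∅ := by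
  apply Finset.eq_empty_of_forall_notMem
  intro c hc
  rw [mem_toF] at hc
  exact hc.2

lemma toF_insert (W H : Int) (X : Set (Int × Int)) (c : Int × Int) (hc : inb W H c) :
    toF W H (insert c X) = insert c (toF W H X) := by
  apply Finset.ext
  intro a
  rw [mem_toF, Finset.mem_insert, mem_toF, Set.mem_insert_iff]
  constructor
  · rintro ⟨h1, h2 | h2⟩
    · exact Or.inl h2
    · exact Or.inr ⟨h1, h2⟩
  · rintro (rfl | ⟨h1, h2⟩)
    · exact ⟨hc, Or.inl rfl⟩
    · exact ⟨h1, Or.inr h2⟩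

lemma bcount_insert (W H : Int) (grid : List (List Int)) (X : Set (Int × Int)) (c : Int × Int)
    (hc : inb W H c) (hnc : c ∉ X) :
    bcount W H grid (insert c X) = bcount W H grid X + (if getI grid c.2 c.1 = 0 then 1 else 0) := by
  unfold bcount
  rw [toF_insert W H X c hc, Finset.filter_insert]
  have hn : c ∉ (toF W H X).filter (fun c => getI grid c.2 c.1 = 0) := by
    rw [Finset.mem_filter, mem_toF]
    rintro ⟨⟨_, h⟩, _⟩
    exact hnc h
  by_cases h : getI grid c.2 c.1 = 0
  · rw [if_pos h, Finset.card_insert_of_notMem hn, if_pos h]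
  · rw [if_neg h, if_neg h]
    omega

lemma wcount_insert (W H : Int) (grid : List (List Int)) (X : Set (Int × Int)) (c : Int × Int)
    (hc : inb W H c) (hnc : c ∉ X) :
    wcount W H grid (insert c X) = wcount W H grid X + (if getI grid c.2 c.1 = 0 then 0 else 1) := by
  unfold wcount
  rw [toF_insert W H X c hc, Finset.filter_insert]
  have hn : c ∉ (toF W H X).filter (fun c => getI grid c.2 c.1 ≠ 0) := by
    rw [Finset.mem_filter, mem_toF]
    rintro ⟨⟨_, h⟩, _⟩
    exact hnc h
  by_cases h : getI grid c.2 c.1 = 0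
  · rw [if_neg (not_not_intro h), if_pos h]
    omega
  · rw [if_pos h, Finset.card_insert_of_notMem hn, if_neg h]

-- the two central identities on reach sets
lemma reach_empty_sources (W H : Int) (grid : List (List Int)) (A : Set (Int × Int)) :
    ReachS W H grid A ∅ = ∅ := by
  apply Set.eq_empty_iff_forall_notMem.2
  rintro x ⟨s, hs, _⟩
  exact hs

lemma reach_peel (W H : Int) (grid : List (List Int)) (MS T : Set (Int × Int)) (c : Int × Int)
    (hcM : c ∈ MS) (hcT : c ∉ T) (_hTM : T ⊆ MS) :
    ReachS W H grid (MS \ insert c T) (insert c T)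
      = insert c (ReachS W H grid
          ((MS ∪ {b | adjP W H grid c b ∧ b ∉ MS}) \ (T ∪ {b | adjP W H grid c b ∧ b ∉ MS}))
          (T ∪ {b | adjP W H grid c b ∧ b ∉ MS}))
    ∧ c ∉ ReachS W H grid
          ((MS ∪ {b | adjP W H grid c b ∧ b ∉ MS}) \ (T ∪ {b | adjP W H grid c b ∧ b ∉ MS}))
          (T ∪ {b | adjP W H grid c b ∧ b ∉ MS}) := by
  set N : Set (Int × Int) := {b | adjP W H grid c b ∧ b ∉ MS} with hN
  set A : Set (Int × Int) := MS \ insert c T with hA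
  set A' : Set (Int × Int) := (MS ∪ N) \ (T ∪ N) with hA'
  set E' : Set (Int × Int) := T ∪ N with hE'
  have hcA' : c ∈ A' := by
    constructor
    · exact Or.inl hcM
    · rintro (h | h)
      · exact hcT h
      · exact h.2 hcM
  have hcE' : c ∉ E' := hcA'.2
  have hcR' : c ∉ ReachS W H grid A' E' := by
    intro h
    rcases reach_cases W H grid A' E' h with h | h
    · exact hcE' h
    · exact h hcA'
  have havoid : ∀ b, b ∉ A' → b ∉ A := by
    intro b hb hbA
    obtain ⟨hbM, hbE⟩ := hbA
    apply hb
    constructor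
    · exact Or.inl hbM
    · rintro (h | h)
      · exact hbE (Or.inr h)
      · exact h.2 hbM
  constructor
  · apply Set.Subset.antisymm
    · apply reach_least
      · intro e he
        rcases Set.mem_insert_iff.1 he with rfl | he
        · exact Set.mem_insert _ _
        · exact Set.mem_insert_iff.2 (Or.inr (reach_sources _ _ _ _ _ (Or.inl he)))
      · intro a ha b hab hbA
        rcases Set.mem_insert_iff.1 ha with rfl | ha
        · -- step from c
          by_cases hbM : b ∈ MS
          · have hbE : b ∈ insert a T := by
              by_contra hbe
              exact hbA ⟨hbM, hbe⟩
            rcases Set.mem_insert_iff.1 hbE with rfl | hbE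
            · exact Set.mem_insert _ _
            · exact Set.mem_insert_iff.2 (Or.inr (reach_sources _ _ _ _ _ (Or.inl hbE)))
          · exact Set.mem_insert_iff.2 (Or.inr (reach_sources _ _ _ _ _ (Or.inr ⟨hab, hbM⟩)))
        · -- step from inside the inner reach set
          by_cases hbA' : b ∈ A'
          · obtain ⟨hbMN, hbE'⟩ := hbA'
            have hbM : b ∈ MS := by
              rcases hbMN with h | h
              · exact h
              · exact absurd (Or.inr h) hbE'
            have hbE : b ∈ insert c T := by
              by_contra hbe
              exact hbA ⟨hbM, hbe⟩
            rcases Set.mem_insert_iff.1 hbE with rfl | hbT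
            · exact Set.mem_insert _ _
            · exact absurd (Or.inl hbT) hbE'
          · exact Set.mem_insert_iff.2 (Or.inr (reach_closed _ _ _ _ _ ha hab hbA'))
    · intro x hx
      rcases Set.mem_insert_iff.1 hx with rfl | hx
      · exact reach_sources _ _ _ _ _ (Set.mem_insert _ _)
      · refine reach_least W H grid A' E' (ReachS W H grid A (insert c T)) ?_ ?_ hx
        · rintro e (he | he)
          · exact reach_sources _ _ _ _ _ (Set.mem_insert_iff.2 (Or.inr he))
          · -- e ∈ N : one step from c
            apply reach_closed _ _ _ _ _ (reach_sources _ _ _ _ _ (Set.mem_insert _ _)) he.1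
            intro heA
            exact he.2 heA.1
        · intro a ha b hab hbA'
          exact reach_closed _ _ _ _ _ ha hab (havoid b hbA')
  · exact hcR'

lemma reach_fresh (W H : Int) (grid : List (List Int)) (V : Set (Int × Int)) (s : Int × Int)
    (hV : ∀ a ∈ V, ∀ b, adjP W H grid a b → b ∈ V) (hs : s ∉ V) :
    ReachS W H grid V {s} = ReachS W H grid ∅ {s} := by
  apply Set.Subset.antisymm
  · apply reach_least
    · exact reach_sources _ _ _ _ _
    · intro a ha b hab _
      exact reach_closed _ _ _ _ _ ha hab (Set.notMem_empty b)
  · apply reach_least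
    · exact reach_sources _ _ _ _ _
    · intro a ha b hab _
      have haV : a ∉ V := by
        rcases reach_cases _ _ _ _ _ ha with h | h
        · rcases h with rfl; exact hs
        · exact h
      have hbV : b ∉ V := by
        intro hbv
        exact haV (hV b hbv a (adjP_symm W H grid hab))
      exact reach_closed _ _ _ _ _ ha hab hbV

-- characterisation of the 'for m in move' fold
def nbrOK (W H : Int) (grid : List (List Int)) (nc : Int) (d : List (List Bool)) (b : Int × Int) : Bool :=
  decide (0 ≤ b.1 ∧ b.1 < W ∧ 0 ≤ b.2 ∧ b.2 < H) && (! getB d b.2 b.1) && decide (getI grid b.2 b.1 ≠ nc)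

lemma stepMoves_char (W H : Int) (grid : List (List Int)) (nc x y : Int) :
    ∀ (ms : List (Int × Int)) (d : List (List Bool)) (acc : List (Int × Int)),
    Shaped H W d →
    ((ms.map (fun m => (x + m.1, y + m.2))).Nodup) →
    Shaped H W (stepMoves W H grid nc x y (d, acc) ms).1
    ∧ (stepMoves W H grid nc x y (d, acc) ms).2
        = acc ++ (ms.map (fun m => (x + m.1, y + m.2))).filter (nbrOK W H grid nc d)
    ∧ (∀ c : Int × Int, inb W H c →
        (getB (stepMoves W H grid nc x y (d, acc) ms).1 c.2 c.1 = true
          ↔ (getB d c.2 c.1 = true ∨ c ∈ (ms.map (fun m => (x + m.1, y + m.2))).filter (nbrOK W H grid nc d))))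
    ∧ countFalse (stepMoves W H grid nc x y (d, acc) ms).1
        + ((ms.map (fun m => (x + m.1, y + m.2))).filter (nbrOK W H grid nc d)).length = countFalse d := by
  intro ms
  induction ms with
  | nil =>
    intro d acc hd _
    refine ⟨hd, by simp [stepMoves], fun c _ => by simp [stepMoves], by simp [stepMoves]⟩
  | cons m ms ih =>
    intro d acc hd hnd
    have hstep : stepMoves W H grid nc x y (d, acc) (m :: ms)
        = stepMoves W H grid nc x y
            (if 0 ≤ x + m.1 ∧ x + m.1 < W ∧ 0 ≤ y + m.2 ∧ y + m.2 < H then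
              if getB d (y + m.2) (x + m.1) = false ∧ getI grid (y + m.2) (x + m.1) ≠ nc then
                (set2d d (y + m.2) (x + m.1) true, acc ++ [(x + m.1, y + m.2)])
              else (d, acc)
            else (d, acc)) ms := by
      simp only [stepMoves, List.foldl_cons]
    have hnd2 := hnd
    rw [List.map_cons, List.nodup_cons] at hnd2
    obtain ⟨htm, hnd'⟩ := hnd2
    by_cases hb1 : 0 ≤ x + m.1 ∧ x + m.1 < W ∧ 0 ≤ y + m.2 ∧ y + m.2 < H
    · by_cases hb2 : getB d (y + m.2) (x + m.1) = false ∧ getI grid (y + m.2) (x + m.1) ≠ nc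
      · -- the neighbour is marked and enqueued
        have hin : inb W H (x + m.1, y + m.2) := hb1
        have hd1 : Shaped H W (set2d d (y + m.2) (x + m.1) true) :=
          shaped_set2d H W d hd (x + m.1) (y + m.2) true hin
        have hok : nbrOK W H grid nc d (x + m.1, y + m.2) = true := by
          simp only [nbrOK, Bool.and_eq_true, decide_eq_true_eq, Bool.not_eq_true']
          exact ⟨⟨hb1, hb2.1⟩, hb2.2⟩
        have hcongr : (ms.map (fun m => (x + m.1, y + m.2))).filter
              (nbrOK W H grid nc (set2d d (y + m.2) (x + m.1) true))
            = (ms.map (fun m => (x + m.1, y + m.2))).filter (nbrOK W H grid nc d) := by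
          apply List.filter_congr
          intro b hb
          have hbne : b ≠ (x + m.1, y + m.2) := fun h => htm (h ▸ hb)
          by_cases hbin : inb W H b
          · have := getB_set2d H W d hd (x + m.1) (y + m.2) true hin b.1 b.2
              (by cases b; exact hbin)
            have hne2 : ¬ (b.2 = y + m.2 ∧ b.1 = x + m.1) := by
              intro hcontra
              exact hbne (Prod.ext hcontra.2 hcontra.1)
            rw [if_neg hne2] at this
            simp only [nbrOK, this]
          · have hbin' : ¬ (0 ≤ b.1 ∧ b.1 < W ∧ 0 ≤ b.2 ∧ b.2 < H) := by
              intro hcontra; exact hbin (by cases b; exact hcontra)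
            simp only [nbrOK]
            rw [decide_eq_false hbin']
            simp
        obtain ⟨ihS, ihQ, ihM, ihC⟩ := ih (set2d d (y + m.2) (x + m.1) true) (acc ++ [(x + m.1, y + m.2)]) hd1 hnd'
        rw [hstep, if_pos hb1, if_pos hb2]
        refine ⟨ihS, ?_, ?_, ?_⟩
        · rw [ihQ, hcongr]
          simp only [List.map_cons, List.filter_cons_of_pos hok, List.append_assoc, List.singleton_append]
        · intro c hc
          rw [ihM c hc, hcongr]
          have hget := getB_set2d H W d hd (x + m.1) (y + m.2) true hin c.1 c.2 (by cases c; exact hc)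
          simp only [List.map_cons, List.filter_cons_of_pos hok, List.mem_cons]
          by_cases hceq : c = (x + m.1, y + m.2)
          · subst hceq
            rw [if_pos ⟨rfl, rfl⟩] at hget
            simp [hget]
          · have hne2 : ¬ (c.2 = y + m.2 ∧ c.1 = x + m.1) := by
              intro hcontra
              exact hceq (Prod.ext hcontra.2 hcontra.1)
            rw [if_neg hne2] at hget
            rw [hget]
            constructor
            · rintro (h | h)
              · exact Or.inl h
              · exact Or.inr (Or.inr h)
            · rintro (h | h | h)
              · exact Or.inl h
              · exact absurd h hceq
              · exact Or.inr h
        · rw [hcongr] at ihC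
          have hcf := countFalse_set2d H W d hd (x + m.1) (y + m.2) hin hb2.1
          simp only [List.map_cons, List.filter_cons_of_pos hok, List.length_cons]
          omega
      · -- in bounds but already marked or same colour: skipped
        have hok : ¬ nbrOK W H grid nc d (x + m.1, y + m.2) = true := by
          simp only [nbrOK, Bool.and_eq_true, decide_eq_true_eq, Bool.not_eq_true']
          rintro ⟨⟨_, h1⟩, h2⟩
          exact hb2 ⟨h1, h2⟩
        obtain ⟨ihS, ihQ, ihM, ihC⟩ := ih d acc hd hnd'
        rw [hstep, if_pos hb1, if_neg hb2]
        rw [List.map_cons, List.filter_cons_of_neg hok]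
        exact ⟨ihS, ihQ, ihM, ihC⟩
    · -- out of bounds: skipped
      have hok : ¬ nbrOK W H grid nc d (x + m.1, y + m.2) = true := by
        simp only [nbrOK, Bool.and_eq_true, decide_eq_true_eq]
        rintro ⟨⟨h1, _⟩, _⟩
        exact hb1 h1
      obtain ⟨ihS, ihQ, ihM, ihC⟩ := ih d acc hd hnd'
      rw [hstep, if_neg hb1]
      rw [List.map_cons, List.filter_cons_of_neg hok]
      exact ⟨ihS, ihQ, ihM, ihC⟩

lemma targets_eq (x y : Int) :
    moveList.map (fun m => (x + m.1, y + m.2)) = nbrTuples x y := by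
  simp [moveList, nbrTuples, sub_eq_add_neg]

lemma targets_nodup (x y : Int) : (moveList.map (fun m => (x + m.1, y + m.2))).Nodup := by
  rw [targets_eq]
  simp [nbrTuples, Prod.ext_iff]
  omega

lemma bfs_char (W H : Int) (grid : List (List Int)) :
    ∀ (fuel : Nat) (q : List (Int × Int)) (d : List (List Bool)) (black white : Int),
    Shaped H W d →
    q.Nodup →
    (∀ c ∈ q, inb W H c ∧ getB d c.2 c.1 = true) →
    countFalse d + q.length ≤ fuel →
    ∃ d', bfsLoop W H grid fuel q d black white
        = (black + (bcount W H grid (ReachS W H grid (dSet W H d \ {c | c ∈ q}) {c | c ∈ q}) : Int),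
           white + (wcount W H grid (ReachS W H grid (dSet W H d \ {c | c ∈ q}) {c | c ∈ q}) : Int), d')
      ∧ Shaped H W d'
      ∧ dSet W H d' = dSet W H d ∪ ReachS W H grid (dSet W H d \ {c | c ∈ q}) {c | c ∈ q} := by
  intro fuel
  induction fuel with
  | zero =>
    intro q d black white hd hnd hq hfuel
    have hqnil : q = [] := by
      cases q with
      | nil => rfl
      | cons a t => simp at hfuel
    subst hqnil
    refine ⟨d, ?_, hd, ?_⟩
    · have hempty : ({c | c ∈ ([] : List (Int × Int))} : Set (Int × Int)) = ∅ := by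
        ext c; simp
      rw [hempty, reach_empty_sources]
      simp [bfsLoop, bcount, wcount, toF_empty]
    · have hempty : ({c | c ∈ ([] : List (Int × Int))} : Set (Int × Int)) = ∅ := by
        ext c; simp
      rw [hempty, reach_empty_sources]
      simp
  | succ fuel ih =>
    intro q d black white hd hnd hq hfuel
    cases q with
    | nil =>
      refine ⟨d, ?_, hd, ?_⟩
      · have hempty : ({c | c ∈ ([] : List (Int × Int))} : Set (Int × Int)) = ∅ := by
          ext c; simp
        rw [hempty, reach_empty_sources]
        simp [bfsLoop, bcount, wcount, toF_empty]
      · have hempty : ({c | c ∈ ([] : List (Int × Int))} : Set (Int × Int)) = ∅ := by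
          ext c; simp
        rw [hempty, reach_empty_sources]
        simp
    | cons c0 rest =>
      obtain ⟨x, y⟩ := c0
      have hin : inb W H (x, y) := (hq _ List.mem_cons_self).1
      have hmk : getB d y x = true := (hq _ List.mem_cons_self).2
      obtain ⟨hT, hR⟩ := List.nodup_cons.1 hnd
      -- characterise the move fold
      obtain ⟨sS, sQ, sM, sC⟩ := stepMoves_char W H grid (getI grid y x) x y moveList d rest hd (targets_nodup x y)
      set nc := getI grid y x with hnc
      set st := stepMoves W H grid nc x y (d, rest) moveList with hst
      set nl := (moveList.map (fun m => (x + m.1, y + m.2))).filter (nbrOK W H grid nc d) with hnl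
      -- set abbreviations
      set MS := dSet W H d with hMS
      set T : Set (Int × Int) := {c | c ∈ rest} with hTdef
      set N : Set (Int × Int) := {b | adjP W H grid (x, y) b ∧ b ∉ MS} with hNdef
      -- nl is exactly N as a set
      have hnlN : ∀ b : Int × Int, b ∈ nl ↔ b ∈ N := by
        intro b
        rw [hnl, List.mem_filter, targets_eq, mem_nbrTuples]
        simp only [hNdef, Set.mem_setOf_eq, adjP, nbrOK, Bool.and_eq_true, decide_eq_true_eq,
          Bool.not_eq_true', hMS, dSet, Set.mem_setOf_eq]
        constructor
        · rintro ⟨hrel, ⟨hbin, hgb⟩, hcol⟩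
          exact ⟨⟨hin, hbin, hrel, hcol⟩, fun hmem => by rw [hmem.2] at hgb; exact Bool.false_ne_true hgb.symm⟩
        · rintro ⟨⟨_, hbin, hrel, hcol⟩, hnotM⟩
          refine ⟨hrel, ⟨hbin, ?_⟩, hcol⟩
          cases hgb : getB d b.2 b.1 with
          | false => rfl
          | true => exact absurd ⟨hbin, hgb⟩ hnotM
      have hnlnodup : nl.Nodup := by
        rw [hnl]
        exact List.Nodup.filter _ (targets_nodup x y)
      have hnlinb : ∀ b ∈ nl, inb W H b := fun b hb => ((hnlN b).1 hb).1.2.1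
      have hnlnotM : ∀ b ∈ nl, b ∉ MS := fun b hb => ((hnlN b).1 hb).2
      -- the new queue
      have hq'nodup : (rest ++ nl).Nodup := by
        rw [List.nodup_append]
        refine ⟨hR, hnlnodup, ?_⟩
        intro a ha b hb heq
        exact hnlnotM b hb (heq ▸ ⟨(hq a (List.mem_cons_of_mem _ ha)).1, (hq a (List.mem_cons_of_mem _ ha)).2⟩)
      have hq'marked : ∀ c ∈ rest ++ nl, inb W H c ∧ getB st.1 c.2 c.1 = true := by
        intro c hc
        rcases List.mem_append.1 hc with h | h
        · have := hq c (List.mem_cons_of_mem _ h)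
          exact ⟨this.1, (sM c this.1).2 (Or.inl this.2)⟩
        · exact ⟨hnlinb c h, (sM c (hnlinb c h)).2 (Or.inr h)⟩
      have hfuel' : countFalse st.1 + (rest ++ nl).length ≤ fuel := by
        rw [List.length_append]
        simp only [List.length_cons] at hfuel
        omega
      -- dSet of the updated matrix
      have hdst : dSet W H st.1 = MS ∪ N := by
        ext c
        simp only [dSet, Set.mem_setOf_eq, Set.mem_union]
        constructor
        · rintro ⟨hcin, hcg⟩
          rcases (sM c hcin).1 hcg with h | h
          · exact Or.inl ⟨hcin, h⟩
          · exact Or.inr ((hnlN c).1 h)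
        · rintro (⟨hcin, hcg⟩ | h)
          · exact ⟨hcin, (sM c hcin).2 (Or.inl hcg)⟩
          · have hcin := h.1.2.1
            exact ⟨hcin, (sM c hcin).2 (Or.inr ((hnlN c).2 h))⟩
      -- apply the induction hypothesis
      obtain ⟨d', ihEq, ihS, ihD⟩ := ih (rest ++ nl) st.1 
        (if nc ≠ 0 then black else black + 1) (if nc ≠ 0 then white + 1 else white)
        sS hq'nodup hq'marked hfuel'
      -- source/avoid set bookkeeping
      have hq'set : ({c | c ∈ rest ++ nl} : Set (Int × Int)) = T ∪ N := by
        ext c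
        simp only [Set.mem_setOf_eq, List.mem_append, Set.mem_union, hTdef, Set.mem_setOf_eq]
        exact or_congr Iff.rfl (hnlN c)
      have hqset : ({c | c ∈ (x, y) :: rest} : Set (Int × Int)) = insert (x, y) T := by
        ext c
        simp [hTdef, Set.mem_insert_iff]
      -- the peel identity
      have hcM : (x, y) ∈ MS := ⟨hin, hmk⟩
      have hcT : (x, y) ∉ T := hT
      have hTM : T ⊆ MS := fun a ha => ⟨(hq a (List.mem_cons_of_mem _ ha)).1, (hq a (List.mem_cons_of_mem _ ha)).2⟩
      obtain ⟨hpeel, hcR'⟩ := reach_peel W H grid MS T (x, y) hcM hcT hTM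
      set R' := ReachS W H grid ((MS ∪ N) \ (T ∪ N)) (T ∪ N) with hR'def
      -- rewrite the IH result sets
      rw [hdst, hq'set] at ihEq ihD
      rw [← hR'def] at ihEq ihD
      rw [hqset]
      rw [hpeel]
      -- counts of the inserted cell
      have hbc : (bcount W H grid (insert (x, y) R') : Int)
          = bcount W H grid R' + (if getI grid y x = 0 then 1 else 0) := by
        rw [bcount_insert W H grid R' (x, y) hin hcR']
        split <;> push_cast <;> ring
      have hwc : (wcount W H grid (insert (x, y) R') : Int)
          = wcount W H grid R' + (if getI grid y x = 0 then 0 else 1) := by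
        rw [wcount_insert W H grid R' (x, y) hin hcR']
        split <;> push_cast <;> ring
      refine ⟨d', ?_, ihS, ?_⟩
      · show bfsLoop W H grid (fuel + 1) ((x, y) :: rest) d black white = _
        have hunfold : bfsLoop W H grid (fuel + 1) ((x, y) :: rest) d black white
            = bfsLoop W H grid fuel st.2 st.1 (if nc ≠ 0 then black else black + 1)
                (if nc ≠ 0 then white + 1 else white) := by
          simp only [bfsLoop, hst, hnc]
        rw [hunfold, sQ]
        rw [ihEq, hbc, hwc]
        rw [← hnc]
        simp only [Prod.mk.injEq, and_true]
        constructor <;> split_ifs <;> omega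
      · rw [ihD]
        ext c
        simp only [Set.mem_union, Set.mem_insert_iff]
        constructor
        · rintro ((h | h) | h)
          · exact Or.inl h
          · exact Or.inr (Or.inr (reach_sources _ _ _ _ _ (Or.inr h)))
          · exact Or.inr (Or.inr h)
        · rintro (h | h | h)
          · exact Or.inl (Or.inl h)
          · subst h; exact Or.inl (Or.inl hcM)
          · exact Or.inr h

-- B-side: characterisation of one saturation pass, the saturation loop, and the counters
lemma mem_foldl_add {α : Type} [BEq α] [LawfulBEq α] (P : α → Prop) [DecidablePred P]
    (L : List α) (acc : PySem.Set α) (x : α) :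
    (x ∈ L.foldl (fun a q => if P q then PySem.Set.add a q else a) acc)
      ↔ x ∈ acc ∨ (x ∈ L ∧ P x) := by
  induction L generalizing acc with
  | nil => simp
  | cons h t ih =>
    simp only [List.foldl_cons, ih, List.mem_cons]
    by_cases hp : P h
    · rw [if_pos hp, PySem.Set.mem_add]
      constructor
      · rintro ((h1 | h1) | h1)
        · exact Or.inl h1
        · exact Or.inr ⟨Or.inl h1, h1 ▸ hp⟩
        · exact Or.inr ⟨Or.inr h1.1, h1.2⟩
      · rintro (h1 | ⟨(h1 | h1), h2⟩)
        · exact Or.inl (Or.inl h1)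
        · exact Or.inl (Or.inr h1)
        · exact Or.inr ⟨h1, h2⟩
    · rw [if_neg hp]
      constructor
      · rintro (h1 | h1)
        · exact Or.inl h1
        · exact Or.inr ⟨Or.inr h1.1, h1.2⟩
      · rintro (h1 | ⟨(h1 | h1), h2⟩)
        · exact Or.inl h1
        · exact absurd (h1 ▸ h2) hp
        · exact Or.inr ⟨h1, h2⟩

lemma mem_newFrom (W H : Int) (grid : List (List Int)) (comp : PySem.Set (Int × Int)) (x : Int × Int) :
    x ∈ newFrom W H grid comp
      ↔ ∃ p ∈ comp, nbrRel p x ∧ (0 ≤ x.1 ∧ x.1 < W ∧ 0 ≤ x.2 ∧ x.2 < H) ∧ x ∉ comp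
          ∧ getI grid x.2 x.1 ≠ getI grid p.2 p.1 := by
  unfold newFrom
  have aux : ∀ (l : List (Int × Int)) (acc : PySem.Set (Int × Int)),
      (x ∈ l.foldl (fun acc p =>
        (nbrTuples p.1 p.2).foldl (fun acc q =>
          if 0 ≤ q.1 ∧ q.1 < W ∧ 0 ≤ q.2 ∧ q.2 < H ∧ ¬ q ∈ comp ∧ getI grid q.2 q.1 ≠ getI grid p.2 p.1 then
            PySem.Set.add acc q
          else acc) acc) acc)
      ↔ x ∈ acc ∨ ∃ p ∈ l, x ∈ nbrTuples p.1 p.2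
          ∧ (0 ≤ x.1 ∧ x.1 < W ∧ 0 ≤ x.2 ∧ x.2 < H ∧ ¬ x ∈ comp ∧ getI grid x.2 x.1 ≠ getI grid p.2 p.1) := by
    intro l
    induction l with
    | nil => simp
    | cons p t ih =>
      intro acc
      simp only [List.foldl_cons, ih, mem_foldl_add, List.mem_cons]
      constructor
      · rintro ((h1 | h1) | h1)
        · exact Or.inl h1
        · exact Or.inr ⟨p, Or.inl rfl, h1⟩
        · obtain ⟨p', hp', hrest⟩ := h1
          exact Or.inr ⟨p', Or.inr hp', hrest⟩
      · rintro (h1 | ⟨p', (rfl | hp'), hrest⟩)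
        · exact Or.inl (Or.inl h1)
        · exact Or.inl (Or.inr hrest)
        · exact Or.inr ⟨p', hp', hrest⟩
  rw [aux]
  simp only [PySem.Set.empty, List.not_mem_nil, false_or]
  constructor
  · rintro ⟨p, hp, hmem, h1, h2, h3, h4, h5, h6⟩
    exact ⟨p, hp, (mem_nbrTuples p.1 p.2 x).1 hmem, ⟨h1, h2, h3, h4⟩, h5, h6⟩
  · rintro ⟨p, hp, hrel, ⟨h1, h2, h3, h4⟩, h5, h6⟩
    exact ⟨p, hp, (mem_nbrTuples p.1 p.2 x).2 hrel, h1, h2, h3, h4, h5, h6⟩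

lemma length_le_card (W H : Int) (l : List (Int × Int)) (hl : l.Nodup)
    (h : ∀ c ∈ l, inb W H c) : l.length ≤ (cellsF W H).card := by
  have hsub : l.toFinset ⊆ cellsF W H := by
    intro c hc
    rw [mem_cellsF]
    exact h c (List.mem_toFinset.1 hc)
  calc l.length = l.toFinset.card := (List.toFinset_card_of_nodup hl).symm
    _ ≤ (cellsF W H).card := Finset.card_le_card hsub

lemma satLoop_char (W H : Int) (grid : List (List Int)) (s : Int × Int) (hs : inb W H s) :
    ∀ (n : Nat) (S : PySem.Set (Int × Int)), S.Nodup →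
    (∀ c ∈ S, c ∈ ReachS W H grid ∅ {s}) → s ∈ S →
    (cellsF W H).card + 1 ≤ n + S.length →
    (satLoop W H grid n S).Nodup
    ∧ (∀ c, c ∈ satLoop W H grid n S ↔ c ∈ ReachS W H grid ∅ {s}) := by
  intro n
  induction n with
  | zero =>
    intro S hnd hsub hmem hcard
    exfalso
    have hinb : ∀ c ∈ S, inb W H c := fun c hc =>
      reach_subset_inb W H grid ∅ {s} (by rintro t rfl; exact hs) c (hsub c hc)
    have := length_le_card W H S hnd hinb
    omega
  | succ n ih =>
    intro S hnd hsub hmem hcard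
    have hnewmem : ∀ b, b ∈ newFrom W H grid S ↔ ∃ p ∈ S, adjP W H grid p b ∧ b ∉ S := by
      intro b
      rw [mem_newFrom]
      constructor
      · rintro ⟨p, hp, hrel, hbnd, hnot, hcol⟩
        have hpin : inb W H p :=
          reach_subset_inb W H grid ∅ {s} (by rintro t rfl; exact hs) p (hsub p hp)
        exact ⟨p, hp, ⟨hpin, hbnd, hrel, hcol⟩, hnot⟩
      · rintro ⟨p, hp, ⟨hpin, hbin, hrel, hcol⟩, hnot⟩
        exact ⟨p, hp, hrel, hbin, hnot, hcol⟩
    show (satLoop W H grid (n + 1) S).Nodup ∧ _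
    rw [satLoop]
    by_cases hnew : newFrom W H grid S = []
    · rw [if_pos hnew]
      refine ⟨hnd, fun c => ⟨fun hc => hsub c hc, ?_⟩⟩
      intro hc
      refine reach_least W H grid ∅ {s} {c | c ∈ S} (by rintro t rfl; exact hmem) ?_ hc
      intro a ha b hab _
      by_contra hb
      have : b ∈ newFrom W H grid S := (hnewmem b).2 ⟨a, ha, hab, hb⟩
      rw [hnew] at this
      exact List.not_mem_nil this
    · rw [if_neg hnew]
      have hsub' : ∀ c ∈ PySem.Set.union S (newFrom W H grid S), c ∈ ReachS W H grid ∅ {s} := by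
        intro c hc
        rcases (PySem.Set.mem_union _ _ _).1 hc with h | h
        · exact hsub c h
        · obtain ⟨p, hp, hadj, _⟩ := (hnewmem c).1 h
          exact reach_closed W H grid ∅ {s} (hsub p hp) hadj (Set.notMem_empty c)
      have hnd' : (PySem.Set.union S (newFrom W H grid S)).Nodup := PySem.Set.nodup_union _ _ hnd
      have hlen : S.length + 1 ≤ (PySem.Set.union S (newFrom W H grid S)).length := by
        obtain ⟨b0, hb0⟩ := List.exists_mem_of_ne_nil _ hnew
        obtain ⟨_, _, _, hb0S⟩ := (hnewmem b0).1 hb0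
        have hsubF : insert b0 S.toFinset ⊆ (PySem.Set.union S (newFrom W H grid S)).toFinset := by
          intro c hc
          rw [List.mem_toFinset]
          rcases Finset.mem_insert.1 hc with rfl | hc
          · exact (PySem.Set.mem_union _ _ _).2 (Or.inr hb0)
          · exact (PySem.Set.mem_union _ _ _).2 (Or.inl (List.mem_toFinset.1 hc))
        have h1 := Finset.card_le_card hsubF
        rw [Finset.card_insert_of_notMem (by rw [List.mem_toFinset]; exact hb0S)] at h1
        rw [List.toFinset_card_of_nodup hnd, List.toFinset_card_of_nodup hnd'] at h1
        omega
      exact ih _ hnd' hsub' ((PySem.Set.mem_union _ _ _).2 (Or.inl hmem)) (by omega)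

lemma countBW_aux (grid : List (List Int)) :
    ∀ (l : List (Int × Int)) (b0 w0 : Int),
    l.foldl (fun bw p => if getI grid p.2 p.1 ≠ 0 then (bw.1, bw.2 + 1) else (bw.1 + 1, bw.2)) (b0, w0)
      = (b0 + (l.countP (fun p => decide (getI grid p.2 p.1 = 0)) : Int),
         w0 + (l.countP (fun p => decide (getI grid p.2 p.1 ≠ 0)) : Int)) := by
  intro l
  induction l with
  | nil => simp
  | cons p t ih =>
    intro b0 w0
    simp only [List.foldl_cons, List.countP_cons]
    by_cases hp : getI grid p.2 p.1 = 0
    · have h1 : (decide (getI grid p.2 p.1 = 0)) = true := by simp [hp]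
      have h2 : (decide (getI grid p.2 p.1 ≠ 0)) = false := by simp [hp]
      rw [if_neg (not_not_intro hp), ih, h1, h2]
      simp only [if_true, Prod.mk.injEq]
      constructor <;> push_cast <;> ring
    · have h1 : (decide (getI grid p.2 p.1 = 0)) = false := by simp [hp]
      have h2 : (decide (getI grid p.2 p.1 ≠ 0)) = true := by simp [hp]
      rw [if_pos hp, ih, h1, h2]
      simp only [if_true, Prod.mk.injEq]
      constructor <;> push_cast <;> ring

lemma countP_eq_card (W H : Int) (l : List (Int × Int)) (hl : l.Nodup) (X : Set (Int × Int))
    (hmem : ∀ c, c ∈ l ↔ c ∈ X) (hX : ∀ c ∈ X, inb W H c) (p : Int × Int → Prop)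
    [DecidablePred p] :
    l.countP (fun c => decide (p c)) = ((toF W H X).filter p).card := by
  have htoF : toF W H X = l.toFinset := by
    apply Finset.ext
    intro c
    rw [mem_toF, List.mem_toFinset, ← hmem c]
    constructor
    · exact fun h => h.2
    · intro h
      exact ⟨hX c ((hmem c).1 h), h⟩
  rw [htoF]
  have h2 : Finset.filter p l.toFinset = (l.filter (fun c => decide (p c))).toFinset := by
    rw [List.toFinset_filter]
    apply Finset.ext
    intro c
    simp
  rw [h2, List.toFinset_card_of_nodup (hl.filter _), List.countP_eq_length_filter]

-- the paired invariant between A's (matrix, answer) state and B's (visited set, answer) state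
def InvAB (W H : Int) (grid : List (List Int)) (stA : List (List Bool) × Int)
    (stB : PySem.Set (Int × Int) × Int) : Prop :=
  Shaped H W stA.1 ∧ stB.1.Nodup ∧ stA.2 = stB.2
  ∧ (∀ c : Int × Int, (inb W H c ∧ getB stA.1 c.2 c.1 = true) ↔ c ∈ stB.1)
  ∧ (∀ a ∈ stB.1, ∀ b, adjP W H grid a b → b ∈ stB.1)

lemma card_cellsF (W H : Int) : (cellsF W H).card = W.toNat * H.toNat := by
  simp [cellsF, Int.card_Ico]

lemma cell_step (W H : Int) (grid : List (List Int)) (sy sx : Int)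
    (hsy : 0 ≤ sy ∧ sy < H) (hsx : 0 ≤ sx ∧ sx < W)
    (stA : List (List Bool) × Int) (stB : PySem.Set (Int × Int) × Int)
    (hInv : InvAB W H grid stA stB) :
    InvAB W H grid
      (if getB stA.1 sy sx then stA else
        let d1 := set2d stA.1 sy sx true
        let r := bfsLoop W H grid (H.toNat * W.toNat + 1) [(sx, sy)] d1 0 0
        (r.2.2, stA.2 + r.1 * r.2.1))
      (if (sx, sy) ∈ stB.1 then stB else
        let comp := satLoop W H grid (H * W + 1).toNat (PySem.Set.ofList [(sx, sy)])
        let bw := countBW grid comp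
        (PySem.Set.union stB.1 comp, stB.2 + bw.1 * bw.2)) := by
  obtain ⟨hShape, hNodup, hAns, hIff, hClosed⟩ := hInv
  have hsin : inb W H (sx, sy) := ⟨hsx.1, hsx.2, hsy.1, hsy.2⟩
  by_cases hvis : (sx, sy) ∈ stB.1
  · have hgb : getB stA.1 sy sx = true := ((hIff (sx, sy)).2 hvis).2
    rw [if_pos hgb, if_pos hvis]
    exact ⟨hShape, hNodup, hAns, hIff, hClosed⟩
  · have hgb : ¬ getB stA.1 sy sx = true := fun h => hvis ((hIff (sx, sy)).1 ⟨hsin, h⟩)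
    rw [if_neg hgb, if_neg hvis]
    have hgb' : getB stA.1 sy sx = false := by
      cases h : getB stA.1 sy sx
      · rfl
      · exact absurd h hgb
    set V : Set (Int × Int) := dSet W H stA.1 with hVdef
    have hVB : ∀ c, c ∈ V ↔ c ∈ stB.1 := fun c => (hIff c)
    have hsV : (sx, sy) ∉ V := fun h => hvis ((hVB _).1 h)
    have hVclosed : ∀ a ∈ V, ∀ b, adjP W H grid a b → b ∈ V := by
      intro a ha b hab
      exact (hVB b).2 (hClosed a ((hVB a).1 ha) b hab)
    -- A side: run the characterised BFS
    have hd1S : Shaped H W (set2d stA.1 sy sx true) := shaped_set2d H W stA.1 hShape sx sy true hsin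
    have hd1g : getB (set2d stA.1 sy sx true) sy sx = true := by
      rw [getB_set2d H W stA.1 hShape sx sy true hsin sx sy hsin, if_pos ⟨rfl, rfl⟩]
    have hcf : countFalse (set2d stA.1 sy sx true) + 1 = countFalse stA.1 :=
      countFalse_set2d H W stA.1 hShape sx sy hsin hgb'
    have hcfle : countFalse stA.1 ≤ H.toNat * W.toNat := countFalse_le H W stA.1 hShape
    obtain ⟨d', hEq, hS', hD'⟩ := bfs_char W H grid (H.toNat * W.toNat + 1) [(sx, sy)]
      (set2d stA.1 sy sx true) 0 0 hd1S (by simp)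
      (by intro c hc; rw [List.mem_singleton] at hc; subst hc; exact ⟨hsin, hd1g⟩)
      (by simp only [List.length_singleton]; omega)
    have hsingle : ({c | c ∈ [(sx, sy)]} : Set (Int × Int)) = {(sx, sy)} := by
      ext c; simp
    have hdset1 : dSet W H (set2d stA.1 sy sx true) = insert (sx, sy) V := by
      ext c
      simp only [dSet, Set.mem_setOf_eq, Set.mem_insert_iff, hVdef]
      constructor
      · rintro ⟨hcin, hcg⟩
        rw [getB_set2d H W stA.1 hShape sx sy true hsin c.1 c.2 (by cases c; exact hcin)] at hcg
        by_cases hce : c.2 = sy ∧ c.1 = sx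
        · exact Or.inl (Prod.ext hce.2 hce.1)
        · rw [if_neg hce] at hcg
          exact Or.inr ⟨hcin, hcg⟩
      · rintro (rfl | ⟨hcin, hcg⟩)
        · exact ⟨hsin, hd1g⟩
        · refine ⟨hcin, ?_⟩
          rw [getB_set2d H W stA.1 hShape sx sy true hsin c.1 c.2 (by cases c; exact hcin)]
          by_cases hce : c.2 = sy ∧ c.1 = sx
          · rw [if_pos hce]
          · rw [if_neg hce]; exact hcg
    have havoid : dSet W H (set2d stA.1 sy sx true) \ {(sx, sy)} = V := by
      rw [hdset1]
      ext c
      simp only [Set.mem_diff, Set.mem_insert_iff, Set.mem_singleton_iff]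
      constructor
      · rintro ⟨rfl | hc, hne⟩
        · exact absurd rfl hne
        · exact hc
      · intro hc
        exact ⟨Or.inr hc, fun h => hsV (h ▸ hc)⟩
    have hreach : ReachS W H grid (dSet W H (set2d stA.1 sy sx true) \ {c | c ∈ [(sx, sy)]})
          {c | c ∈ [(sx, sy)]}
        = ReachS W H grid ∅ {(sx, sy)} := by
      rw [hsingle, havoid]
      exact reach_fresh W H grid V (sx, sy) hVclosed hsV
    set Comp : Set (Int × Int) := ReachS W H grid ∅ {(sx, sy)} with hCompdef
    have hCompinb : ∀ c ∈ Comp, inb W H c :=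
      reach_subset_inb W H grid ∅ {(sx, sy)} (by rintro t rfl; exact hsin)
    have hsComp : (sx, sy) ∈ Comp := reach_sources _ _ _ _ _ rfl
    have hCompclosed : ∀ a ∈ Comp, ∀ b, adjP W H grid a b → b ∈ Comp := by
      intro a ha b hab
      exact reach_closed W H grid ∅ {(sx, sy)} ha hab (Set.notMem_empty b)
    rw [hreach] at hEq hD'
    -- B side: the saturation computes the same component
    have hofl : PySem.Set.ofList [(sx, sy)] = [(sx, sy)] :=
      PySem.Set.ofList_eq_self_of_nodup _ (List.nodup_singleton _)
    have hHW : (H * W + 1).toNat = W.toNat * H.toNat + 1 := by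
      have h1 : ((W.toNat : ℤ)) = W := Int.toNat_of_nonneg (by omega)
      have h2 : ((H.toNat : ℤ)) = H := Int.toNat_of_nonneg (by omega)
      have h3 : H * W + 1 = ((W.toNat * H.toNat + 1 : ℕ) : ℤ) := by push_cast [h1, h2]; ring
      rw [h3, Int.toNat_natCast]
    obtain ⟨hcompnd, hcompmem⟩ := satLoop_char W H grid (sx, sy) hsin (H * W + 1).toNat
      [(sx, sy)] (by simp)
      (by intro c hc; rw [List.mem_singleton] at hc; subst hc; exact hsComp)
      (List.mem_singleton.2 rfl)
      (by rw [card_cellsF, hHW]; simp)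
    rw [← hofl] at hcompnd hcompmem
    set comp := satLoop W H grid (H * W + 1).toNat (PySem.Set.ofList [(sx, sy)]) with hcompdef
    -- the counters agree
    have hbw : countBW grid comp
        = ((bcount W H grid Comp : Int), (wcount W H grid Comp : Int)) := by
      unfold countBW
      rw [countBW_aux grid comp 0 0]
      rw [countP_eq_card W H comp hcompnd Comp hcompmem hCompinb (fun c => getI grid c.2 c.1 = 0)]
      rw [countP_eq_card W H comp hcompnd Comp hcompmem hCompinb (fun c => getI grid c.2 c.1 ≠ 0)]
      simp only [Prod.mk.injEq]
      constructor <;> ring_nf <;> rfl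
    show InvAB W H grid
      ((bfsLoop W H grid (H.toNat * W.toNat + 1) [(sx, sy)] (set2d stA.1 sy sx true) 0 0).2.2,
        stA.2 + (bfsLoop W H grid (H.toNat * W.toNat + 1) [(sx, sy)] (set2d stA.1 sy sx true) 0 0).1
          * (bfsLoop W H grid (H.toNat * W.toNat + 1) [(sx, sy)] (set2d stA.1 sy sx true) 0 0).2.1)
      (PySem.Set.union stB.1 comp, stB.2 + (countBW grid comp).1 * (countBW grid comp).2)
    rw [hEq, hbw]
    refine ⟨hS', PySem.Set.nodup_union _ _ hNodup, ?_, ?_, ?_⟩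
    · show stA.2 + (0 + (bcount W H grid Comp : Int)) * (0 + (wcount W H grid Comp : Int))
        = stB.2 + (bcount W H grid Comp : Int) * (wcount W H grid Comp : Int)
      rw [hAns]; ring
    · intro c
      show (inb W H c ∧ getB d' c.2 c.1 = true) ↔ _
      have hcd : (inb W H c ∧ getB d' c.2 c.1 = true) ↔ c ∈ dSet W H d' := Iff.rfl
      rw [hcd, hD', hdset1]
      rw [PySem.Set.mem_union]
      constructor
      · rintro ((rfl | h) | h)
        · exact Or.inr ((hcompmem _).2 hsComp)
        · exact Or.inl ((hVB c).1 h)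
        · exact Or.inr ((hcompmem c).2 h)
      · rintro (h | h)
        · exact Or.inl (Or.inr ((hVB c).2 h))
        · exact Or.inr ((hcompmem c).1 h)
    · intro a ha b hab
      rcases (PySem.Set.mem_union _ _ _).1 ha with h | h
      · exact (PySem.Set.mem_union _ _ _).2 (Or.inl (hClosed a h b hab))
      · exact (PySem.Set.mem_union _ _ _).2
          (Or.inr ((hcompmem b).2 (hCompclosed a ((hcompmem a).1 h) b hab)))

lemma row_fold (W H : Int) (grid : List (List Int)) (sy : Int) (hsy : 0 ≤ sy ∧ sy < H) :
    ∀ (xs : List Int), (∀ x ∈ xs, 0 ≤ x ∧ x < W) →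
    ∀ (stA : List (List Bool) × Int) (stB : PySem.Set (Int × Int) × Int),
    InvAB W H grid stA stB →
    InvAB W H grid
      (xs.foldl (fun st sx =>
        if getB st.1 sy sx then st
        else
          let d1 := set2d st.1 sy sx true
          let r := bfsLoop W H grid (H.toNat * W.toNat + 1) [(sx, sy)] d1 0 0
          (r.2.2, st.2 + r.1 * r.2.1)) stA)
      (xs.foldl (fun st sx =>
        if (sx, sy) ∈ st.1 then st
        else
          let comp := satLoop W H grid (H * W + 1).toNat (PySem.Set.ofList [(sx, sy)])
          let bw := countBW grid comp
          (PySem.Set.union st.1 comp, st.2 + bw.1 * bw.2)) stB) := by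
  intro xs
  induction xs with
  | nil => exact fun _ stA stB h => h
  | cons x t ih =>
    intro hb stA stB hInv
    simp only [List.foldl_cons]
    exact ih (fun z hz => hb z (List.mem_cons_of_mem _ hz)) _ _
      (cell_step W H grid sy x hsy (hb x List.mem_cons_self) stA stB hInv)

lemma outer_fold (W H : Int) (grid : List (List Int)) :
    ∀ (ys : List Int), (∀ y ∈ ys, 0 ≤ y ∧ y < H) →
    ∀ (stA : List (List Bool) × Int) (stB : PySem.Set (Int × Int) × Int),
    InvAB W H grid stA stB →
    InvAB W H grid
      (ys.foldl (fun st sy =>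
        (PySem.List.pyRange 0 W 1).foldl (fun st sx =>
          if getB st.1 sy sx then st
          else
            let d1 := set2d st.1 sy sx true
            let r := bfsLoop W H grid (H.toNat * W.toNat + 1) [(sx, sy)] d1 0 0
            (r.2.2, st.2 + r.1 * r.2.1)) st) stA)
      (ys.foldl (fun st sy =>
        (PySem.List.pyRange 0 W 1).foldl (fun st sx =>
          if (sx, sy) ∈ st.1 then st
          else
            let comp := satLoop W H grid (H * W + 1).toNat (PySem.Set.ofList [(sx, sy)])
            let bw := countBW grid comp
            (PySem.Set.union st.1 comp, st.2 + bw.1 * bw.2)) st) stB) := by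
  intro ys
  induction ys with
  | nil => exact fun _ stA stB h => h
  | cons y t ih =>
    intro hb stA stB hInv
    simp only [List.foldl_cons]
    refine ih (fun z hz => hb z (List.mem_cons_of_mem _ hz)) _ _ ?_
    exact row_fold W H grid y (hb y List.mem_cons_self) (PySem.List.pyRange 0 W 1)
      (fun x hx => PySem.List.mem_pyRange_one.1 hx) stA stB hInv

-- ===== VERDICT (by name: the statement is the Claim_ definition above) =====
theorem bfs_grid_spec : Claim_equal_bfs_grid := by
  intro H W grid _ _
  unfold Spec_bfs_grid
  have hInv0 : InvAB W H grid
      ((PySem.List.pyRange 0 H 1).map (fun _ => (PySem.List.pyRange 0 W 1).map (fun _ => false)), 0)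
      (PySem.Set.empty, 0) := by
    refine ⟨shaped_d0 H W, by simp [PySem.Set.empty], rfl, ?_, ?_⟩
    · intro c
      constructor
      · rintro ⟨_, hg⟩
        rw [getB_d0 H W c.1 c.2] at hg
        exact absurd hg (by simp)
      · intro hc
        exact absurd hc (by simp [PySem.Set.empty])
    · intro a ha
      exact absurd ha (by simp [PySem.Set.empty])
  have hfin := outer_fold W H grid (PySem.List.pyRange 0 H 1)
    (fun y hy => PySem.List.mem_pyRange_one.1 hy) _ _ hInv0
  exact hfin.2.2.1
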